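-- pv_equiv track=rewrite | github.com/maoulee/RelationRior | scripts/run_streamlined_test.py | _detect_stage_from_actions
-- ===== SOURCE A (Python) =====
-- from typing import Any, Dict, List, Optional, Tuple
--
-- STAGE_TOOLS = {
--     1: {"check_entities", "find_entities", "explore_schema"},
--     2: {"plan_subquestion", "plan"},
--     3: {"match_pattern", "action"},
--     4: set(),  # no tool calls, just extraction
--     5: set(),  # no tool calls, just answer
-- }
--
-- def _detect_stage_from_actions(tool_calls: List[Dict]) -> int:
--     """Determine which stage the model's tool calls belong to."""
--     if not tool_calls:
--         return 5  # assume final answer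
--     tools = {tc.get("tool_name", "") for tc in tool_calls}
--     for stage, allowed in STAGE_TOOLS.items():
--         if tools & allowed:
--             return stage
--     return 3  # default to execution
-- ===== SOURCE B (Python) =====
-- from typing import Any, Dict, List, Optional, Tuple
--
-- # Inverted index: tool name -> stage number (flattened from the stage table).
-- _TOOL_STAGE = {
--     "check_entities": 1, "find_entities": 1, "explore_schema": 1,
--     "plan_subquestion": 2, "plan": 2,
--     "match_pattern": 3, "action": 3,
-- }
--
-- def _detect_stage_from_actions(tool_calls: List[Dict]) -> int:
--     """Determine which stage the model's tool calls belong to."""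
--     if not tool_calls:
--         return 5  # assume final answer
--     stages = [_TOOL_STAGE[name] for tc in tool_calls
--               if (name := tc.get("tool_name", "")) in _TOOL_STAGE]
--     return min(stages, default=3)
-- ===== Notes on version B (the rewrite author's own statement) =====
-- stated objective: idiomatic
-- what changed: Replaces A's scan of the 5-stage table against a set comprehension of tool names by a flat name->stage inverted index: look each tool call's name up once and return the minimum matched stage (default 3), keeping the empty->5 short-circuit.
import Mathlib
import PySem

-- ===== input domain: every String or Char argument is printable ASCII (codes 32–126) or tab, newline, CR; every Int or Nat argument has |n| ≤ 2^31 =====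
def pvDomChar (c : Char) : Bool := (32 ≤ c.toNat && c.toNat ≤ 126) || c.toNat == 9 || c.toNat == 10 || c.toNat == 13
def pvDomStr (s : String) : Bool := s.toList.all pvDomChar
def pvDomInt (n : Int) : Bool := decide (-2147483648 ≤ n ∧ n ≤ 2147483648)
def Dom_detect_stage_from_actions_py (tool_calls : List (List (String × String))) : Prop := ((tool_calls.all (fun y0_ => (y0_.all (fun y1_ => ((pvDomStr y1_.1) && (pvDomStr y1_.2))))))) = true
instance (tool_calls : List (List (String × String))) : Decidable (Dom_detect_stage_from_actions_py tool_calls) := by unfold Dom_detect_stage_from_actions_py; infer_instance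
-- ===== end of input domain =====

-- B replaces A's scan of the 5-stage table against a set of tool names by a flat
-- name→stage inverted index plus min-with-default (idiomatic; same cost).

-- ===== PORT A =====
-- the module constant STAGE_TOOLS, in dict insertion order (sets used only for membership)
def pvStageTools : List (Int × List String) :=
  [(1, ["check_entities", "find_entities", "explore_schema"]),
   (2, ["plan_subquestion", "plan"]),
   (3, ["match_pattern", "action"]),
   (4, []),
   (5, [])]

-- 'for stage, allowed in STAGE_TOOLS.items(): if tools & allowed: return stage / return 3'
def pvStageLoop (tools : PySem.Set String) : List (Int × List String) → Int
  | [] => 3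
  | (stage, allowed) :: rest =>
      if PySem.Set.inter tools allowed ≠ [] then stage else pvStageLoop tools rest

def detect_stage_from_actions_py (tool_calls : List (List (String × String))) : Int :=
  if tool_calls = [] then 5
  else
    let tools : PySem.Set String :=
      PySem.Set.ofList (tool_calls.map fun tc => PySem.Dict.getD (PySem.Dict.mk tc) "tool_name" "")
    pvStageLoop tools pvStageTools

-- ===== PORT B =====
-- the module constant _TOOL_STAGE (inverted index tool name -> stage)
def pvToolStage : PySem.Dict String Int :=
  PySem.Dict.mk
    [("check_entities", 1), ("find_entities", 1), ("explore_schema", 1),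
     ("plan_subquestion", 2), ("plan", 2),
     ("match_pattern", 3), ("action", 3)]

def detect_stage_from_actions_py_alt (tool_calls : List (List (String × String))) : Int :=
  if tool_calls = [] then 5
  else
    let stages := tool_calls.filterMap fun tc =>
      PySem.Dict.get? pvToolStage (PySem.Dict.getD (PySem.Dict.mk tc) "tool_name" "")
    PySem.List.minD stages (fun x => x) 3

-- ===== PRECONDITION & SPEC =====
def Spec_detect_stage_from_actions_py (tool_calls : List (List (String × String))) (out : Int) : Prop := out = detect_stage_from_actions_py_alt tool_calls
instance (tool_calls : List (List (String × String))) (out : Int) : Decidable (Spec_detect_stage_from_actions_py tool_calls out) := by unfold Spec_detect_stage_from_actions_py; infer_instance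

-- ===== CLAIM (what is proved, stated in full; the proofs are below) =====
def Claim_equal_detect_stage_from_actions_py : Prop := ∀ (tool_calls : List (List (String × String))), Dom_detect_stage_from_actions_py tool_calls → Spec_detect_stage_from_actions_py tool_calls (detect_stage_from_actions_py tool_calls)

-- ===== LEMMAS AND PROOFS =====

-- the inverted index agrees with the stage table, written out as one lookup characterisation
theorem pvToolStage_get? (t : String) :
    PySem.Dict.get? pvToolStage t =
      if t = "check_entities" ∨ t = "find_entities" ∨ t = "explore_schema" then some 1
      else if t = "plan_subquestion" ∨ t = "plan" then some 2
      else if t = "match_pattern" ∨ t = "action" then some 3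
      else none := by
  simp only [pvToolStage, PySem.Dict.get?_mk_cons, beq_iff_eq]
  by_cases h1 : t = "check_entities" <;> by_cases h2 : t = "find_entities" <;>
    by_cases h3 : t = "explore_schema" <;> by_cases h4 : t = "plan_subquestion" <;>
    by_cases h5 : t = "plan" <;> by_cases h6 : t = "match_pattern" <;>
    by_cases h7 : t = "action" <;>
    simp_all [PySem.Dict.get?, eq_comm]

theorem pvStg_range {t : String} {v : Int} (h : PySem.Dict.get? pvToolStage t = some v) :
    v = 1 ∨ v = 2 ∨ v = 3 := by
  rw [pvToolStage_get?] at h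
  split_ifs at h <;> simp_all

-- nonempty set intersection = some element of the set lies in the other list
theorem pvInter_ne_nil {s : PySem.Set String} {l : List String} :
    PySem.Set.inter s l ≠ [] ↔ ∃ x ∈ s, x ∈ l := by
  simp [PySem.Set.inter, List.filter_eq_nil_iff]

-- membership in each stage's allowed set, through the inverted index
theorem pvMem1 (t : String) : t ∈ (["check_entities", "find_entities", "explore_schema"] : List String)
    ↔ PySem.Dict.get? pvToolStage t = some 1 := by
  rw [pvToolStage_get?]; split_ifs <;> simp_all

theorem pvMem2 (t : String) : t ∈ (["plan_subquestion", "plan"] : List String)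
    ↔ PySem.Dict.get? pvToolStage t = some 2 := by
  rw [pvToolStage_get?]; split_ifs <;> simp_all
  rename_i hd; rcases hd with rfl | rfl | rfl <;> decide

theorem pvMem3 (t : String) : t ∈ (["match_pattern", "action"] : List String)
    ↔ PySem.Dict.get? pvToolStage t = some 3 := by
  rw [pvToolStage_get?]; split_ifs <;> simp_all
  · rename_i hd; rcases hd with rfl | rfl | rfl <;> decide
  · rename_i hd; rcases hd with rfl | rfl <;> decide

-- A's table scan, characterised through the inverted index
theorem pvStageLoop_eq (names : List String) :
    pvStageLoop (PySem.Set.ofList names) pvStageTools =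
      if ∃ t ∈ names, PySem.Dict.get? pvToolStage t = some 1 then 1
      else if ∃ t ∈ names, PySem.Dict.get? pvToolStage t = some 2 then 2
      else 3 := by
  simp only [pvStageTools, pvStageLoop, pvInter_ne_nil]
  simp only [fun x => PySem.Set.mem_ofList names x, pvMem1, pvMem2, pvMem3, List.not_mem_nil,
    and_false, exists_false, if_false, ite_self]

-- min over a list of values in {1,2,3}, with default 3
theorem pvMinD123 (l : List Int) (h : ∀ x ∈ l, x = 1 ∨ x = 2 ∨ x = 3) :
    PySem.List.minD l (fun x => x) 3 =
      if (1 : Int) ∈ l then 1 else if (2 : Int) ∈ l then 2 else 3 := by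
  cases l with
  | nil => simp [PySem.List.minD, PySem.List.min?]
  | cons a t =>
    have hD : PySem.List.minD (a :: t) (fun x => x) 3 = t.foldl min a := by
      simp [PySem.List.minD, PySem.List.min?_id_cons]
    have hle := PySem.List.foldl_min_le t a
    have hmem := PySem.List.foldl_min_mem t a
    have hmem' : t.foldl min a ∈ a :: t := by
      rcases hmem with h' | h' <;> simp [h']
    have hr : t.foldl min a = 1 ∨ t.foldl min a = 2 ∨ t.foldl min a = 3 := h _ hmem'
    rw [hD]
    by_cases h1 : (1 : Int) ∈ a :: t
    · have h1le : t.foldl min a ≤ 1 := by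
        rcases List.mem_cons.mp h1 with h' | h'
        · exact h' ▸ hle.1
        · exact hle.2 _ h'
      rw [if_pos h1]; omega
    · rw [if_neg h1]
      have hne1 : t.foldl min a ≠ 1 := fun e => h1 (e ▸ hmem')
      by_cases h2 : (2 : Int) ∈ a :: t
      · have h2le : t.foldl min a ≤ 2 := by
          rcases List.mem_cons.mp h2 with h' | h'
          · exact h' ▸ hle.1
          · exact hle.2 _ h'
        rw [if_pos h2]; omega
      · rw [if_neg h2]
        have hne2 : t.foldl min a ≠ 2 := fun e => h2 (e ▸ hmem')
        omega

-- ===== VERDICT (by name: the statement is the Claim_ definition above) =====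
theorem detect_stage_from_actions_py_spec : Claim_equal_detect_stage_from_actions_py := by
  intro tool_calls _
  unfold Spec_detect_stage_from_actions_py detect_stage_from_actions_py detect_stage_from_actions_py_alt
  by_cases hnil : tool_calls = []
  · simp [hnil]
  · simp only [if_neg hnil]
    set names := tool_calls.map fun tc => PySem.Dict.getD (PySem.Dict.mk tc) "tool_name" "" with hn
    have hfm : (tool_calls.filterMap fun tc =>
        PySem.Dict.get? pvToolStage (PySem.Dict.getD (PySem.Dict.mk tc) "tool_name" "")) =
        names.filterMap (fun t => PySem.Dict.get? pvToolStage t) := by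
      rw [hn, List.filterMap_map]; rfl
    rw [hfm, pvStageLoop_eq names, pvMinD123]
    · simp only [List.mem_filterMap]
    · intro x hx
      rcases List.mem_filterMap.mp hx with ⟨t, _, ht⟩
      exact pvStg_range ht
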